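-- pv_equiv track=rewrite | github.com/GonzalezLab/invases_species | curation_toolkit.py | count_domains_by_order
-- ===== SOURCE A (Python) =====
-- def count_domains_by_order(profiles, order):
--     right_doms = 0
--     other_doms = 0
--     if order == "LINE":
--         right_doms = len(
--             [x for x in profiles.split(",") if '_RT_' in x or '_EN_' in x or '_RNaseH_' in x or '_GAG_' in x])
--         other_doms = len([x for x in profiles.split(",") if '_AP_' in x or '_INT_' in x or '_ENV_' in x or '_Tase_' in x
--                           or '_HEL_' in x or '_RPA_' in x or '_REP_' in x or '_OTU_' in x or '_SET_' in x or '_Prp' in x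
--                           or '_ATPase_' in x or '_PhageINT_' in x])
--     elif order == "LTR":
--         right_doms = len([x for x in profiles.split(",") if
--                         '_GAG_' in x or '_AP_' in x or '_INT_' in x or '_RT_' in x or '_RNaseH_' in x or '_ENV_' in x])
--         other_doms = len([x for x in profiles.split(",") if '_EN_' in x or '_Tase_' in x or '_HEL_' in x or '_RPA_' in x
--                           or '_REP_' in x or '_OTU_' in x or '_SET_' in x or '_Prp' in x or '_ATPase_' in x
--                           or '_PhageINT_' in x])
--
--     elif order == "DIRS":
--         right_doms = len([x for x in profiles.split(",") if
--                         '_GAG_' in x or '_RT_' in x or '_RNaseH_' in x or '_PhageINT_' in x])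
--         other_doms = len([x for x in profiles.split(",") if '_AP_' in x or '_INT_' in x or '_ENV_' in x or '_EN_' in x
--                           or '_Tase_' in x or '_HEL_' in x or '_RPA_' in x or '_REP_' in x or '_OTU_' in x or '_SET_'
--                           in x or '_Prp' in x or '_ATPase_' in x])
--
--     elif order == "TIR":
--         right_doms = len([x for x in profiles.split(",") if '_Tase_' in x])
--         other_doms = len([x for x in profiles.split(",") if '_GAG_' in x or '_AP_' in x or '_INT_' in x or '_RT_' in x
--                           or '_RNaseH_' in x or '_ENV_' in x or '_EN_' in x or '_HEL_' in x or '_RPA_' in x or '_REP_'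
--                           in x or '_OTU_' in x or '_SET_' in x or '_Prp' in x or '_ATPase_' in x or '_PhageINT_' in x])
--
--     elif order == "HELITRON":
--         right_doms = len([x for x in profiles.split(",") if '_HEL_' in x or '_EN_' in x or '_RPA_' in x or '_REP_' in x
--                           or '_OTU_' in x or '_SET_' in x])
--         other_doms = len([x for x in profiles.split(",") if
--                           '_GAG_' in x or '_AP_' in x or '_INT_' in x or '_RT_' in x or '_RNaseH_' in x or '_ENV_' in x
--                           or '_Tase_' in x or '_Prp' in x or '_ATPase_' in x or '_PhageINT_' in x])
--
--     elif order == "MAVERICK":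
--         right_doms = len([x for x in profiles.split(",") if '_Prp' in x or '_ATPase_' in x or '_INT_' in x or '_AP_' in x])
--         other_doms = len([x for x in profiles.split(",") if
--                           '_GAG_' in x or '_AP_' in x or '_INT_' in x or '_RT_' in x or '_RNaseH_' in x or '_ENV_' in x
--                           or '_EN_' in x or '_Tase_' in x or '_HEL_' in x or '_RPA_' in x or '_REP_' in x or '_OTU_' in x
--                           or '_SET_' in x or '_PhageINT_' in x])
--     elif order == "CRYPTON":
--         right_doms = len([x for x in profiles.split(",") if '_PhageINT_' in x])
--         other_doms = len([x for x in profiles.split(",") if '_GAG_' in x or '_AP_' in x or '_INT_' in x or '_RT_' in x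
--                           or '_RNaseH_' in x or '_ENV_' in x or '_EN_' in x or '_HEL_' in x or '_RPA_' in x or '_REP_'
--                           in x or '_OTU_' in x or '_SET_' in x or '_Prp' in x or '_ATPase_' in x or '_Tase_' in x])
--
--     return right_doms, other_doms
-- ===== SOURCE B (Python) =====
-- # Inverted index: keyed by domain tag, each tag lists the orders for which it is
-- # a "right" domain and those for which it is an "other" domain; one pass over the
-- # items, one pass over the tags per item.
-- TAG_ORDERS = {
--     '_RT_':       ({'LINE', 'LTR', 'DIRS'},
--                    {'TIR', 'HELITRON', 'MAVERICK', 'CRYPTON'}),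
--     '_EN_':       ({'LINE', 'HELITRON'},
--                    {'LTR', 'DIRS', 'TIR', 'MAVERICK', 'CRYPTON'}),
--     '_RNaseH_':   ({'LINE', 'LTR', 'DIRS'},
--                    {'TIR', 'HELITRON', 'MAVERICK', 'CRYPTON'}),
--     '_GAG_':      ({'LINE', 'LTR', 'DIRS'},
--                    {'TIR', 'HELITRON', 'MAVERICK', 'CRYPTON'}),
--     '_AP_':       ({'LTR', 'MAVERICK'},
--                    {'LINE', 'DIRS', 'TIR', 'HELITRON', 'MAVERICK', 'CRYPTON'}),
--     '_INT_':      ({'LTR', 'MAVERICK'},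
--                    {'LINE', 'DIRS', 'TIR', 'HELITRON', 'MAVERICK', 'CRYPTON'}),
--     '_ENV_':      ({'LTR'},
--                    {'LINE', 'DIRS', 'TIR', 'HELITRON', 'MAVERICK', 'CRYPTON'}),
--     '_Tase_':     ({'TIR'},
--                    {'LINE', 'LTR', 'DIRS', 'HELITRON', 'MAVERICK', 'CRYPTON'}),
--     '_HEL_':      ({'HELITRON'},
--                    {'LINE', 'LTR', 'DIRS', 'TIR', 'MAVERICK', 'CRYPTON'}),
--     '_RPA_':      ({'HELITRON'},
--                    {'LINE', 'LTR', 'DIRS', 'TIR', 'MAVERICK', 'CRYPTON'}),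
--     '_REP_':      ({'HELITRON'},
--                    {'LINE', 'LTR', 'DIRS', 'TIR', 'MAVERICK', 'CRYPTON'}),
--     '_OTU_':      ({'HELITRON'},
--                    {'LINE', 'LTR', 'DIRS', 'TIR', 'MAVERICK', 'CRYPTON'}),
--     '_SET_':      ({'HELITRON'},
--                    {'LINE', 'LTR', 'DIRS', 'TIR', 'MAVERICK', 'CRYPTON'}),
--     '_Prp':       ({'MAVERICK'},
--                    {'LINE', 'LTR', 'DIRS', 'TIR', 'HELITRON', 'CRYPTON'}),
--     '_ATPase_':   ({'MAVERICK'},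
--                    {'LINE', 'LTR', 'DIRS', 'TIR', 'HELITRON', 'CRYPTON'}),
--     '_PhageINT_': ({'DIRS', 'CRYPTON'},
--                    {'LINE', 'LTR', 'TIR', 'HELITRON', 'MAVERICK'}),
-- }
--
--
-- def count_domains_by_order(profiles, order):
--     right_doms = 0
--     other_doms = 0
--     for x in profiles.split(","):
--         hit_right = False
--         hit_other = False
--         for tag, (right_orders, other_orders) in TAG_ORDERS.items():
--             present = tag in x
--             hit_right = hit_right or (present and order in right_orders)
--             hit_other = hit_other or (present and order in other_orders)
--         right_doms += hit_right
--         other_doms += hit_other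
--     return right_doms, other_doms
-- ===== Notes on version B (the rewrite author's own statement) =====
-- stated objective: alternative
-- what changed: Inverted the data structure: instead of branching on the order and scanning per-order tag lists with list comprehensions, B keeps one inverted index tag -> (orders where it is right, orders where it is other) and classifies each item in a single pass over the canonical tag list, accumulating both counters at once.
import Mathlib
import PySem

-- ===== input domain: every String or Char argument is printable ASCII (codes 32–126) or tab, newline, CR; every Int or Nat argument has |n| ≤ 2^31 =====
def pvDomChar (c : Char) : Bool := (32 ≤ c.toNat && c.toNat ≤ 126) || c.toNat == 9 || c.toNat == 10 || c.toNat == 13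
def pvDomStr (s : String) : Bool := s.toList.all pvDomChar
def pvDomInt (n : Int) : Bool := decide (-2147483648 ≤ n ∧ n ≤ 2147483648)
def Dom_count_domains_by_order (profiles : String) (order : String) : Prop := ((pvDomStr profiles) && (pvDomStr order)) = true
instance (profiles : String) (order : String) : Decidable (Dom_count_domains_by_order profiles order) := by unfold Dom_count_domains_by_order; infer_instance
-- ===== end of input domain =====

-- B inverts A's table: instead of branching on the order and scanning per-order tag lists,
-- it indexes by tag (tag -> the orders for which it is right/other) and classifies each item
-- in one pass over the canonical tag list (simpler decomposition, same cost).

-- ===== PORT A =====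
def count_domains_by_order (profiles : String) (order : String) : Int × Int :=
  if order == "LINE" then
    (((((PySem.Str.split? profiles ",").getD [])).filter (fun x =>
        PySem.Str.isIn "_RT_" x || PySem.Str.isIn "_EN_" x || PySem.Str.isIn "_RNaseH_" x || PySem.Str.isIn "_GAG_" x)).length,
     ((((PySem.Str.split? profiles ",").getD [])).filter (fun x =>
        PySem.Str.isIn "_AP_" x || PySem.Str.isIn "_INT_" x || PySem.Str.isIn "_ENV_" x || PySem.Str.isIn "_Tase_" x ||
        PySem.Str.isIn "_HEL_" x || PySem.Str.isIn "_RPA_" x || PySem.Str.isIn "_REP_" x || PySem.Str.isIn "_OTU_" x ||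
        PySem.Str.isIn "_SET_" x || PySem.Str.isIn "_Prp" x || PySem.Str.isIn "_ATPase_" x || PySem.Str.isIn "_PhageINT_" x)).length)
  else if order == "LTR" then
    (((((PySem.Str.split? profiles ",").getD [])).filter (fun x =>
        PySem.Str.isIn "_GAG_" x || PySem.Str.isIn "_AP_" x || PySem.Str.isIn "_INT_" x || PySem.Str.isIn "_RT_" x ||
        PySem.Str.isIn "_RNaseH_" x || PySem.Str.isIn "_ENV_" x)).length,
     ((((PySem.Str.split? profiles ",").getD [])).filter (fun x =>
        PySem.Str.isIn "_EN_" x || PySem.Str.isIn "_Tase_" x || PySem.Str.isIn "_HEL_" x || PySem.Str.isIn "_RPA_" x ||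
        PySem.Str.isIn "_REP_" x || PySem.Str.isIn "_OTU_" x || PySem.Str.isIn "_SET_" x || PySem.Str.isIn "_Prp" x ||
        PySem.Str.isIn "_ATPase_" x || PySem.Str.isIn "_PhageINT_" x)).length)
  else if order == "DIRS" then
    (((((PySem.Str.split? profiles ",").getD [])).filter (fun x =>
        PySem.Str.isIn "_GAG_" x || PySem.Str.isIn "_RT_" x || PySem.Str.isIn "_RNaseH_" x || PySem.Str.isIn "_PhageINT_" x)).length,
     ((((PySem.Str.split? profiles ",").getD [])).filter (fun x =>
        PySem.Str.isIn "_AP_" x || PySem.Str.isIn "_INT_" x || PySem.Str.isIn "_ENV_" x || PySem.Str.isIn "_EN_" x ||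
        PySem.Str.isIn "_Tase_" x || PySem.Str.isIn "_HEL_" x || PySem.Str.isIn "_RPA_" x || PySem.Str.isIn "_REP_" x ||
        PySem.Str.isIn "_OTU_" x || PySem.Str.isIn "_SET_" x || PySem.Str.isIn "_Prp" x || PySem.Str.isIn "_ATPase_" x)).length)
  else if order == "TIR" then
    (((((PySem.Str.split? profiles ",").getD [])).filter (fun x => PySem.Str.isIn "_Tase_" x)).length,
     ((((PySem.Str.split? profiles ",").getD [])).filter (fun x =>
        PySem.Str.isIn "_GAG_" x || PySem.Str.isIn "_AP_" x || PySem.Str.isIn "_INT_" x || PySem.Str.isIn "_RT_" x ||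
        PySem.Str.isIn "_RNaseH_" x || PySem.Str.isIn "_ENV_" x || PySem.Str.isIn "_EN_" x || PySem.Str.isIn "_HEL_" x ||
        PySem.Str.isIn "_RPA_" x || PySem.Str.isIn "_REP_" x || PySem.Str.isIn "_OTU_" x || PySem.Str.isIn "_SET_" x ||
        PySem.Str.isIn "_Prp" x || PySem.Str.isIn "_ATPase_" x || PySem.Str.isIn "_PhageINT_" x)).length)
  else if order == "HELITRON" then
    (((((PySem.Str.split? profiles ",").getD [])).filter (fun x =>
        PySem.Str.isIn "_HEL_" x || PySem.Str.isIn "_EN_" x || PySem.Str.isIn "_RPA_" x || PySem.Str.isIn "_REP_" x ||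
        PySem.Str.isIn "_OTU_" x || PySem.Str.isIn "_SET_" x)).length,
     ((((PySem.Str.split? profiles ",").getD [])).filter (fun x =>
        PySem.Str.isIn "_GAG_" x || PySem.Str.isIn "_AP_" x || PySem.Str.isIn "_INT_" x || PySem.Str.isIn "_RT_" x ||
        PySem.Str.isIn "_RNaseH_" x || PySem.Str.isIn "_ENV_" x || PySem.Str.isIn "_Tase_" x || PySem.Str.isIn "_Prp" x ||
        PySem.Str.isIn "_ATPase_" x || PySem.Str.isIn "_PhageINT_" x)).length)
  else if order == "MAVERICK" then
    (((((PySem.Str.split? profiles ",").getD [])).filter (fun x =>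
        PySem.Str.isIn "_Prp" x || PySem.Str.isIn "_ATPase_" x || PySem.Str.isIn "_INT_" x || PySem.Str.isIn "_AP_" x)).length,
     ((((PySem.Str.split? profiles ",").getD [])).filter (fun x =>
        PySem.Str.isIn "_GAG_" x || PySem.Str.isIn "_AP_" x || PySem.Str.isIn "_INT_" x || PySem.Str.isIn "_RT_" x ||
        PySem.Str.isIn "_RNaseH_" x || PySem.Str.isIn "_ENV_" x || PySem.Str.isIn "_EN_" x || PySem.Str.isIn "_Tase_" x ||
        PySem.Str.isIn "_HEL_" x || PySem.Str.isIn "_RPA_" x || PySem.Str.isIn "_REP_" x || PySem.Str.isIn "_OTU_" x ||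
        PySem.Str.isIn "_SET_" x || PySem.Str.isIn "_PhageINT_" x)).length)
  else if order == "CRYPTON" then
    (((((PySem.Str.split? profiles ",").getD [])).filter (fun x => PySem.Str.isIn "_PhageINT_" x)).length,
     ((((PySem.Str.split? profiles ",").getD [])).filter (fun x =>
        PySem.Str.isIn "_GAG_" x || PySem.Str.isIn "_AP_" x || PySem.Str.isIn "_INT_" x || PySem.Str.isIn "_RT_" x ||
        PySem.Str.isIn "_RNaseH_" x || PySem.Str.isIn "_ENV_" x || PySem.Str.isIn "_EN_" x || PySem.Str.isIn "_HEL_" x ||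
        PySem.Str.isIn "_RPA_" x || PySem.Str.isIn "_REP_" x || PySem.Str.isIn "_OTU_" x || PySem.Str.isIn "_SET_" x ||
        PySem.Str.isIn "_Prp" x || PySem.Str.isIn "_ATPase_" x || PySem.Str.isIn "_Tase_" x)).length)
  else (0, 0)

-- ===== PORT B =====
-- TAG_ORDERS: tag -> (orders where it is a "right" domain, orders where it is an "other" domain)
def tagOrders : List (String × (PySem.Set String × PySem.Set String)) :=
  [ ("_RT_",       (PySem.Set.ofList ["LINE", "LTR", "DIRS"],
                    PySem.Set.ofList ["TIR", "HELITRON", "MAVERICK", "CRYPTON"])),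
    ("_EN_",       (PySem.Set.ofList ["LINE", "HELITRON"],
                    PySem.Set.ofList ["LTR", "DIRS", "TIR", "MAVERICK", "CRYPTON"])),
    ("_RNaseH_",   (PySem.Set.ofList ["LINE", "LTR", "DIRS"],
                    PySem.Set.ofList ["TIR", "HELITRON", "MAVERICK", "CRYPTON"])),
    ("_GAG_",      (PySem.Set.ofList ["LINE", "LTR", "DIRS"],
                    PySem.Set.ofList ["TIR", "HELITRON", "MAVERICK", "CRYPTON"])),
    ("_AP_",       (PySem.Set.ofList ["LTR", "MAVERICK"],
                    PySem.Set.ofList ["LINE", "DIRS", "TIR", "HELITRON", "MAVERICK", "CRYPTON"])),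
    ("_INT_",      (PySem.Set.ofList ["LTR", "MAVERICK"],
                    PySem.Set.ofList ["LINE", "DIRS", "TIR", "HELITRON", "MAVERICK", "CRYPTON"])),
    ("_ENV_",      (PySem.Set.ofList ["LTR"],
                    PySem.Set.ofList ["LINE", "DIRS", "TIR", "HELITRON", "MAVERICK", "CRYPTON"])),
    ("_Tase_",     (PySem.Set.ofList ["TIR"],
                    PySem.Set.ofList ["LINE", "LTR", "DIRS", "HELITRON", "MAVERICK", "CRYPTON"])),
    ("_HEL_",      (PySem.Set.ofList ["HELITRON"],
                    PySem.Set.ofList ["LINE", "LTR", "DIRS", "TIR", "MAVERICK", "CRYPTON"])),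
    ("_RPA_",      (PySem.Set.ofList ["HELITRON"],
                    PySem.Set.ofList ["LINE", "LTR", "DIRS", "TIR", "MAVERICK", "CRYPTON"])),
    ("_REP_",      (PySem.Set.ofList ["HELITRON"],
                    PySem.Set.ofList ["LINE", "LTR", "DIRS", "TIR", "MAVERICK", "CRYPTON"])),
    ("_OTU_",      (PySem.Set.ofList ["HELITRON"],
                    PySem.Set.ofList ["LINE", "LTR", "DIRS", "TIR", "MAVERICK", "CRYPTON"])),
    ("_SET_",      (PySem.Set.ofList ["HELITRON"],
                    PySem.Set.ofList ["LINE", "LTR", "DIRS", "TIR", "MAVERICK", "CRYPTON"])),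
    ("_Prp",       (PySem.Set.ofList ["MAVERICK"],
                    PySem.Set.ofList ["LINE", "LTR", "DIRS", "TIR", "HELITRON", "CRYPTON"])),
    ("_ATPase_",   (PySem.Set.ofList ["MAVERICK"],
                    PySem.Set.ofList ["LINE", "LTR", "DIRS", "TIR", "HELITRON", "CRYPTON"])),
    ("_PhageINT_", (PySem.Set.ofList ["DIRS", "CRYPTON"],
                    PySem.Set.ofList ["LINE", "LTR", "TIR", "HELITRON", "MAVERICK"])) ]

-- the inner per-item loop of B (hit_right, hit_other)
def pvHits (order : String) (x : String) : Bool × Bool :=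
  tagOrders.foldl
    (fun (h : Bool × Bool) e =>
      let present := PySem.Str.isIn e.1 x
      (h.1 || (present && e.2.1.contains order),
       h.2 || (present && e.2.2.contains order)))
    (false, false)

def count_domains_by_order_alt (profiles : String) (order : String) : Int × Int :=
  ((PySem.Str.split? profiles ",").getD []).foldl
    (fun (acc : Int × Int) x =>
      let h := pvHits order x
      (acc.1 + (if h.1 then 1 else 0), acc.2 + (if h.2 then 1 else 0)))
    (0, 0)

-- ===== PRECONDITION & SPEC =====
def Spec_count_domains_by_order (profiles : String) (order : String) (out : Int × Int) : Prop := out = count_domains_by_order_alt profiles order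
instance (profiles : String) (order : String) (out : Int × Int) : Decidable (Spec_count_domains_by_order profiles order out) := by unfold Spec_count_domains_by_order; infer_instance

-- ===== CLAIM (what is proved, stated in full; the proofs are below) =====
def Claim_equal_count_domains_by_order : Prop := ∀ (profiles : String) (order : String), Dom_count_domains_by_order profiles order → Spec_count_domains_by_order profiles order (count_domains_by_order profiles order)

-- ===== LEMMAS AND PROOFS =====

-- the double-counter fold equals the pair of filter lengths
theorem foldl_pair_count (p q : String → Bool) (xs : List String) (a b : Int) :
    xs.foldl (fun (acc : Int × Int) x =>
      (acc.1 + (if p x then 1 else 0), acc.2 + (if q x then 1 else 0))) (a, b)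
    = (a + (xs.filter p).length, b + (xs.filter q).length) := by
  induction xs generalizing a b with
  | nil => simp
  | cons y ys ih =>
    simp only [List.foldl_cons, List.filter_cons, ih]
    by_cases hp : p y <;> by_cases hq : q y <;>
      simp [hp, hq, Prod.ext_iff] <;> omega

-- B's outer fold computed via the two per-item predicates
theorem branch_eq (ps : List String) (order : String) (p q : String → Bool)
    (hp : ∀ x, (pvHits order x).1 = p x) (hq : ∀ x, (pvHits order x).2 = q x) :
    (((ps.filter p).length : Int), ((ps.filter q).length : Int)) =
      ps.foldl (fun (acc : Int × Int) x =>
        let h := pvHits order x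
        (acc.1 + (if h.1 then 1 else 0), acc.2 + (if h.2 then 1 else 0))) (0, 0) := by
  have hfun : (fun (acc : Int × Int) x =>
      let h := pvHits order x
      (acc.1 + (if h.1 then 1 else 0), acc.2 + (if h.2 then 1 else 0)))
      = (fun (acc : Int × Int) x =>
      (acc.1 + (if p x then 1 else 0), acc.2 + (if q x then 1 else 0))) := by
    funext acc x; simp [hp, hq]
  rw [hfun, foldl_pair_count]; simp

theorem hits_LINE (x : String) :
    pvHits "LINE" x =
      (PySem.Str.isIn "_RT_" x || PySem.Str.isIn "_EN_" x || PySem.Str.isIn "_RNaseH_" x || PySem.Str.isIn "_GAG_" x,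
       PySem.Str.isIn "_AP_" x || PySem.Str.isIn "_INT_" x || PySem.Str.isIn "_ENV_" x || PySem.Str.isIn "_Tase_" x || PySem.Str.isIn "_HEL_" x || PySem.Str.isIn "_RPA_" x || PySem.Str.isIn "_REP_" x || PySem.Str.isIn "_OTU_" x || PySem.Str.isIn "_SET_" x || PySem.Str.isIn "_Prp" x || PySem.Str.isIn "_ATPase_" x || PySem.Str.isIn "_PhageINT_" x) := by
  simp only [pvHits, tagOrders, List.foldl_cons, List.foldl_nil]
  norm_num [PySem.Set.ofList]
  simp only [show decide (("LINE" : String) = "LINE") = true from by decide,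
    show decide (("LINE" : String) = "LTR") = false from by decide,
    show decide (("LINE" : String) = "DIRS") = false from by decide,
    show decide (("LINE" : String) = "TIR") = false from by decide,
    show decide (("LINE" : String) = "HELITRON") = false from by decide,
    show decide (("LINE" : String) = "MAVERICK") = false from by decide,
    show decide (("LINE" : String) = "CRYPTON") = false from by decide]
  simp only [Bool.and_false, Bool.and_true, Bool.or_false, Bool.false_or]
  constructor <;> (first
    | rfl
    | simp only [Bool.or_comm, Bool.or_left_comm, Bool.or_assoc]
    | simp [or_comm, or_left_comm, or_assoc])

theorem hits_LTR (x : String) :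
    pvHits "LTR" x =
      (PySem.Str.isIn "_GAG_" x || PySem.Str.isIn "_AP_" x || PySem.Str.isIn "_INT_" x || PySem.Str.isIn "_RT_" x || PySem.Str.isIn "_RNaseH_" x || PySem.Str.isIn "_ENV_" x,
       PySem.Str.isIn "_EN_" x || PySem.Str.isIn "_Tase_" x || PySem.Str.isIn "_HEL_" x || PySem.Str.isIn "_RPA_" x || PySem.Str.isIn "_REP_" x || PySem.Str.isIn "_OTU_" x || PySem.Str.isIn "_SET_" x || PySem.Str.isIn "_Prp" x || PySem.Str.isIn "_ATPase_" x || PySem.Str.isIn "_PhageINT_" x) := by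
  simp only [pvHits, tagOrders, List.foldl_cons, List.foldl_nil]
  norm_num [PySem.Set.ofList]
  simp only [show decide (("LTR" : String) = "LINE") = false from by decide,
    show decide (("LTR" : String) = "LTR") = true from by decide,
    show decide (("LTR" : String) = "DIRS") = false from by decide,
    show decide (("LTR" : String) = "TIR") = false from by decide,
    show decide (("LTR" : String) = "HELITRON") = false from by decide,
    show decide (("LTR" : String) = "MAVERICK") = false from by decide,
    show decide (("LTR" : String) = "CRYPTON") = false from by decide]
  simp only [Bool.and_false, Bool.and_true, Bool.or_false, Bool.false_or]
  constructor <;> (first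
    | rfl
    | simp only [Bool.or_comm, Bool.or_left_comm, Bool.or_assoc]
    | simp [or_comm, or_left_comm, or_assoc])

theorem hits_DIRS (x : String) :
    pvHits "DIRS" x =
      (PySem.Str.isIn "_GAG_" x || PySem.Str.isIn "_RT_" x || PySem.Str.isIn "_RNaseH_" x || PySem.Str.isIn "_PhageINT_" x,
       PySem.Str.isIn "_AP_" x || PySem.Str.isIn "_INT_" x || PySem.Str.isIn "_ENV_" x || PySem.Str.isIn "_EN_" x || PySem.Str.isIn "_Tase_" x || PySem.Str.isIn "_HEL_" x || PySem.Str.isIn "_RPA_" x || PySem.Str.isIn "_REP_" x || PySem.Str.isIn "_OTU_" x || PySem.Str.isIn "_SET_" x || PySem.Str.isIn "_Prp" x || PySem.Str.isIn "_ATPase_" x) := by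
  simp only [pvHits, tagOrders, List.foldl_cons, List.foldl_nil]
  norm_num [PySem.Set.ofList]
  simp only [show decide (("DIRS" : String) = "LINE") = false from by decide,
    show decide (("DIRS" : String) = "LTR") = false from by decide,
    show decide (("DIRS" : String) = "DIRS") = true from by decide,
    show decide (("DIRS" : String) = "TIR") = false from by decide,
    show decide (("DIRS" : String) = "HELITRON") = false from by decide,
    show decide (("DIRS" : String) = "MAVERICK") = false from by decide,
    show decide (("DIRS" : String) = "CRYPTON") = false from by decide]
  simp only [Bool.and_false, Bool.and_true, Bool.or_false, Bool.false_or]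
  constructor <;> (first
    | rfl
    | simp only [Bool.or_comm, Bool.or_left_comm, Bool.or_assoc]
    | simp [or_comm, or_left_comm, or_assoc])

theorem hits_TIR (x : String) :
    pvHits "TIR" x =
      (PySem.Str.isIn "_Tase_" x,
       PySem.Str.isIn "_GAG_" x || PySem.Str.isIn "_AP_" x || PySem.Str.isIn "_INT_" x || PySem.Str.isIn "_RT_" x || PySem.Str.isIn "_RNaseH_" x || PySem.Str.isIn "_ENV_" x || PySem.Str.isIn "_EN_" x || PySem.Str.isIn "_HEL_" x || PySem.Str.isIn "_RPA_" x || PySem.Str.isIn "_REP_" x || PySem.Str.isIn "_OTU_" x || PySem.Str.isIn "_SET_" x || PySem.Str.isIn "_Prp" x || PySem.Str.isIn "_ATPase_" x || PySem.Str.isIn "_PhageINT_" x) := by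
  simp only [pvHits, tagOrders, List.foldl_cons, List.foldl_nil]
  norm_num [PySem.Set.ofList]
  simp only [show decide (("TIR" : String) = "LINE") = false from by decide,
    show decide (("TIR" : String) = "LTR") = false from by decide,
    show decide (("TIR" : String) = "DIRS") = false from by decide,
    show decide (("TIR" : String) = "TIR") = true from by decide,
    show decide (("TIR" : String) = "HELITRON") = false from by decide,
    show decide (("TIR" : String) = "MAVERICK") = false from by decide,
    show decide (("TIR" : String) = "CRYPTON") = false from by decide]
  simp only [Bool.and_false, Bool.and_true, Bool.or_false, Bool.false_or]
  constructor <;> (first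
    | rfl
    | simp only [Bool.or_comm, Bool.or_left_comm, Bool.or_assoc]
    | simp [or_comm, or_left_comm, or_assoc])

theorem hits_HELITRON (x : String) :
    pvHits "HELITRON" x =
      (PySem.Str.isIn "_HEL_" x || PySem.Str.isIn "_EN_" x || PySem.Str.isIn "_RPA_" x || PySem.Str.isIn "_REP_" x || PySem.Str.isIn "_OTU_" x || PySem.Str.isIn "_SET_" x,
       PySem.Str.isIn "_GAG_" x || PySem.Str.isIn "_AP_" x || PySem.Str.isIn "_INT_" x || PySem.Str.isIn "_RT_" x || PySem.Str.isIn "_RNaseH_" x || PySem.Str.isIn "_ENV_" x || PySem.Str.isIn "_Tase_" x || PySem.Str.isIn "_Prp" x || PySem.Str.isIn "_ATPase_" x || PySem.Str.isIn "_PhageINT_" x) := by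
  simp only [pvHits, tagOrders, List.foldl_cons, List.foldl_nil]
  norm_num [PySem.Set.ofList]
  simp only [show decide (("HELITRON" : String) = "LINE") = false from by decide,
    show decide (("HELITRON" : String) = "LTR") = false from by decide,
    show decide (("HELITRON" : String) = "DIRS") = false from by decide,
    show decide (("HELITRON" : String) = "TIR") = false from by decide,
    show decide (("HELITRON" : String) = "HELITRON") = true from by decide,
    show decide (("HELITRON" : String) = "MAVERICK") = false from by decide,
    show decide (("HELITRON" : String) = "CRYPTON") = false from by decide]
  simp only [Bool.and_false, Bool.and_true, Bool.or_false, Bool.false_or]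
  constructor <;> (first
    | rfl
    | simp only [Bool.or_comm, Bool.or_left_comm, Bool.or_assoc]
    | simp [or_comm, or_left_comm, or_assoc])

theorem hits_MAVERICK (x : String) :
    pvHits "MAVERICK" x =
      (PySem.Str.isIn "_Prp" x || PySem.Str.isIn "_ATPase_" x || PySem.Str.isIn "_INT_" x || PySem.Str.isIn "_AP_" x,
       PySem.Str.isIn "_GAG_" x || PySem.Str.isIn "_AP_" x || PySem.Str.isIn "_INT_" x || PySem.Str.isIn "_RT_" x || PySem.Str.isIn "_RNaseH_" x || PySem.Str.isIn "_ENV_" x || PySem.Str.isIn "_EN_" x || PySem.Str.isIn "_Tase_" x || PySem.Str.isIn "_HEL_" x || PySem.Str.isIn "_RPA_" x || PySem.Str.isIn "_REP_" x || PySem.Str.isIn "_OTU_" x || PySem.Str.isIn "_SET_" x || PySem.Str.isIn "_PhageINT_" x) := by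
  simp only [pvHits, tagOrders, List.foldl_cons, List.foldl_nil]
  norm_num [PySem.Set.ofList]
  simp only [show decide (("MAVERICK" : String) = "LINE") = false from by decide,
    show decide (("MAVERICK" : String) = "LTR") = false from by decide,
    show decide (("MAVERICK" : String) = "DIRS") = false from by decide,
    show decide (("MAVERICK" : String) = "TIR") = false from by decide,
    show decide (("MAVERICK" : String) = "HELITRON") = false from by decide,
    show decide (("MAVERICK" : String) = "MAVERICK") = true from by decide,
    show decide (("MAVERICK" : String) = "CRYPTON") = false from by decide]
  simp only [Bool.and_false, Bool.and_true, Bool.or_false, Bool.false_or]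
  constructor <;> (first
    | rfl
    | simp only [Bool.or_comm, Bool.or_left_comm, Bool.or_assoc]
    | simp [or_comm, or_left_comm, or_assoc])

theorem hits_CRYPTON (x : String) :
    pvHits "CRYPTON" x =
      (PySem.Str.isIn "_PhageINT_" x,
       PySem.Str.isIn "_GAG_" x || PySem.Str.isIn "_AP_" x || PySem.Str.isIn "_INT_" x || PySem.Str.isIn "_RT_" x || PySem.Str.isIn "_RNaseH_" x || PySem.Str.isIn "_ENV_" x || PySem.Str.isIn "_EN_" x || PySem.Str.isIn "_HEL_" x || PySem.Str.isIn "_RPA_" x || PySem.Str.isIn "_REP_" x || PySem.Str.isIn "_OTU_" x || PySem.Str.isIn "_SET_" x || PySem.Str.isIn "_Prp" x || PySem.Str.isIn "_ATPase_" x || PySem.Str.isIn "_Tase_" x) := by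
  simp only [pvHits, tagOrders, List.foldl_cons, List.foldl_nil]
  norm_num [PySem.Set.ofList]
  simp only [show decide (("CRYPTON" : String) = "LINE") = false from by decide,
    show decide (("CRYPTON" : String) = "LTR") = false from by decide,
    show decide (("CRYPTON" : String) = "DIRS") = false from by decide,
    show decide (("CRYPTON" : String) = "TIR") = false from by decide,
    show decide (("CRYPTON" : String) = "HELITRON") = false from by decide,
    show decide (("CRYPTON" : String) = "MAVERICK") = false from by decide,
    show decide (("CRYPTON" : String) = "CRYPTON") = true from by decide]
  simp only [Bool.and_false, Bool.and_true, Bool.or_false, Bool.false_or]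
  constructor <;> (first
    | rfl
    | simp only [Bool.or_comm, Bool.or_left_comm, Bool.or_assoc]
    | simp [or_comm, or_left_comm, or_assoc])

theorem hits_other (order : String) (h1 : ¬ order = "LINE") (h2 : ¬ order = "LTR")
    (h3 : ¬ order = "DIRS") (h4 : ¬ order = "TIR") (h5 : ¬ order = "HELITRON")
    (h6 : ¬ order = "MAVERICK") (h7 : ¬ order = "CRYPTON") (x : String) :
    pvHits order x = (false, false) := by
  simp only [pvHits, tagOrders, List.foldl_cons, List.foldl_nil]
  norm_num [PySem.Set.ofList]
  simp [h1, h2, h3, h4, h5, h6, h7]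

theorem count_domains_by_order_eq (profiles order : String) :
    count_domains_by_order profiles order = count_domains_by_order_alt profiles order := by
  unfold count_domains_by_order count_domains_by_order_alt
  by_cases h1 : order = "LINE"
  · subst h1
    simp only [beq_self_eq_true, if_true]
    exact branch_eq _ _ _ _ (fun x => by rw [hits_LINE]) (fun x => by rw [hits_LINE])
  · by_cases h2 : order = "LTR"
    · subst h2
      simp only [show (("LTR" : String) == "LINE") = false from rfl, Bool.false_eq_true,
        if_false, beq_self_eq_true, if_true]
      exact branch_eq _ _ _ _ (fun x => by rw [hits_LTR]) (fun x => by rw [hits_LTR])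
    · by_cases h3 : order = "DIRS"
      · subst h3
        simp only [show (("DIRS" : String) == "LINE") = false from rfl,
          show (("DIRS" : String) == "LTR") = false from rfl, Bool.false_eq_true,
          if_false, beq_self_eq_true, if_true]
        exact branch_eq _ _ _ _ (fun x => by rw [hits_DIRS]) (fun x => by rw [hits_DIRS])
      · by_cases h4 : order = "TIR"
        · subst h4
          simp only [show (("TIR" : String) == "LINE") = false from rfl,
            show (("TIR" : String) == "LTR") = false from rfl,
            show (("TIR" : String) == "DIRS") = false from rfl, Bool.false_eq_true,
            if_false, beq_self_eq_true, if_true]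
          exact branch_eq _ _ _ _ (fun x => by rw [hits_TIR]) (fun x => by rw [hits_TIR])
        · by_cases h5 : order = "HELITRON"
          · subst h5
            simp only [show (("HELITRON" : String) == "LINE") = false from rfl,
              show (("HELITRON" : String) == "LTR") = false from rfl,
              show (("HELITRON" : String) == "DIRS") = false from rfl,
              show (("HELITRON" : String) == "TIR") = false from rfl, Bool.false_eq_true,
              if_false, beq_self_eq_true, if_true]
            exact branch_eq _ _ _ _ (fun x => by rw [hits_HELITRON]) (fun x => by rw [hits_HELITRON])
          · by_cases h6 : order = "MAVERICK"
            · subst h6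
              simp only [show (("MAVERICK" : String) == "LINE") = false from rfl,
                show (("MAVERICK" : String) == "LTR") = false from rfl,
                show (("MAVERICK" : String) == "DIRS") = false from rfl,
                show (("MAVERICK" : String) == "TIR") = false from rfl,
                show (("MAVERICK" : String) == "HELITRON") = false from rfl, Bool.false_eq_true,
                if_false, beq_self_eq_true, if_true]
              exact branch_eq _ _ _ _ (fun x => by rw [hits_MAVERICK]) (fun x => by rw [hits_MAVERICK])
            · by_cases h7 : order = "CRYPTON"
              · subst h7
                simp only [show (("CRYPTON" : String) == "LINE") = false from rfl,
                  show (("CRYPTON" : String) == "LTR") = false from rfl,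
                  show (("CRYPTON" : String) == "DIRS") = false from rfl,
                  show (("CRYPTON" : String) == "TIR") = false from rfl,
                  show (("CRYPTON" : String) == "HELITRON") = false from rfl,
                  show (("CRYPTON" : String) == "MAVERICK") = false from rfl, Bool.false_eq_true,
                  if_false, beq_self_eq_true, if_true]
                exact branch_eq _ _ _ _ (fun x => by rw [hits_CRYPTON]) (fun x => by rw [hits_CRYPTON])
              · have hb1 : (order == "LINE") = false := by simp [h1]
                have hb2 : (order == "LTR") = false := by simp [h2]
                have hb3 : (order == "DIRS") = false := by simp [h3]
                have hb4 : (order == "TIR") = false := by simp [h4]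
                have hb5 : (order == "HELITRON") = false := by simp [h5]
                have hb6 : (order == "MAVERICK") = false := by simp [h6]
                have hb7 : (order == "CRYPTON") = false := by simp [h7]
                simp only [hb1, hb2, hb3, hb4, hb5, hb6, hb7, Bool.false_eq_true, if_false]
                have hz := branch_eq ((PySem.Str.split? profiles ",").getD []) order
                  (fun _ => false) (fun _ => false)
                  (fun x => by rw [hits_other order h1 h2 h3 h4 h5 h6 h7])
                  (fun x => by rw [hits_other order h1 h2 h3 h4 h5 h6 h7])
                simpa using hz

-- ===== VERDICT (by name: the statement is the Claim_ definition above) =====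
theorem count_domains_by_order_spec : Claim_equal_count_domains_by_order := by
  intro profiles order _
  exact count_domains_by_order_eq profiles order
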